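-- pv_equiv track=rewrite | github.com/Rafael-Sapienza/computacao | programas/1Semestre/projetoAPC/projeto_v1.py | ondeEstaoAsAspas
-- ===== SOURCE A (Python) =====
-- def ondeEstaoAsAspas(stringOriginal):
--     posicaoAspasSemPar = []
--     posicaoAspasComPar = []
--     for i,item in enumerate(stringOriginal):
--         if item == '"':
--             posicaoAspasSemPar.append(i)
--             if len(posicaoAspasSemPar) == 2:
--                 posicaoAspasComPar.append(posicaoAspasSemPar)
--                 posicaoAspasSemPar = []
--     return posicaoAspasComPar,posicaoAspasSemPar
-- ===== SOURCE B (Python) =====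
-- def ondeEstaoAsAspas(stringOriginal):
--     pos = [i for i, c in enumerate(stringOriginal) if c == '"']
--     pairs = []
--     k = 0
--     while k + 1 < len(pos):
--         pairs.append([pos[k], pos[k + 1]])
--         k += 2
--     return pairs, pos[k:]
-- ===== Notes on version B (the rewrite author's own statement) =====
-- stated objective: alternative
-- what changed: B first collects all quote positions into an index list with one comprehension, then pairs them by striding through that list two at a time, taking the remaining suffix as the leftover, instead of A's single pass that maintains a two-slot buffer it flushes into the result.
import Mathlib
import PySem

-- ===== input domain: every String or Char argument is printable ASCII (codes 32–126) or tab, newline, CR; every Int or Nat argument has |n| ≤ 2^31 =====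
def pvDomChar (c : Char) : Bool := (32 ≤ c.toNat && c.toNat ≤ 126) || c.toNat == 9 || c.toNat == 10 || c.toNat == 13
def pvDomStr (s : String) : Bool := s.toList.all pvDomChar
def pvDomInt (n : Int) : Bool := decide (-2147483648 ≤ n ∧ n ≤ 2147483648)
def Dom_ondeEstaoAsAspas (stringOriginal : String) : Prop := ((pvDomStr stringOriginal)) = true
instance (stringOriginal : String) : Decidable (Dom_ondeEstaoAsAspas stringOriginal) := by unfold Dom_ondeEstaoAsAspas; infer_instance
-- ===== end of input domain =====

-- B restates A as: collect the quote positions once, then pair them off by striding two at a time;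
-- A instead keeps a two-slot buffer it flushes during a single enumerate pass. Same result, different decomposition.

-- ===== PORT A =====
-- the loop body: state is (posicaoAspasSemPar, posicaoAspasComPar)
def ondeEstaoAsAspasStep (st : List Int × List (List Int)) (p : Int × Char) : List Int × List (List Int) :=
  if p.2 = '"' then
    let sem := st.1 ++ [p.1]
    if sem.length = 2 then ([], st.2 ++ [sem]) else (sem, st.2)
  else st

def ondeEstaoAsAspas (stringOriginal : String) : List (List Int) × List Int :=
  let st := (PySem.List.enumerate stringOriginal.toList).foldl ondeEstaoAsAspasStep ([], [])
  (st.2, st.1)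

-- ===== PORT B =====
-- the while loop advancing k by 2 over pos, returning (pairs, pos[k:]), ported as
-- structural recursion on the suffix pos[k:] that consumes two positions at a time
def pairStride : List Int → List (List Int) × List Int
  | x :: y :: r => let pr := pairStride r; ([x, y] :: pr.1, pr.2)
  | r => ([], r)

def ondeEstaoAsAspas_alt (stringOriginal : String) : List (List Int) × List Int :=
  let pos := (PySem.List.enumerate stringOriginal.toList).filterMap
    (fun p => if p.2 = '"' then some p.1 else none)
  pairStride pos

-- ===== PRECONDITION & SPEC =====
def Spec_ondeEstaoAsAspas (stringOriginal : String) (out : List (List Int) × List Int) : Prop := out = ondeEstaoAsAspas_alt stringOriginal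
instance (stringOriginal : String) (out : List (List Int) × List Int) : Decidable (Spec_ondeEstaoAsAspas stringOriginal out) := by unfold Spec_ondeEstaoAsAspas; infer_instance

-- ===== CLAIM (what is proved, stated in full; the proofs are below) =====
def Claim_equal_ondeEstaoAsAspas : Prop := ∀ (stringOriginal : String), Dom_ondeEstaoAsAspas stringOriginal → Spec_ondeEstaoAsAspas stringOriginal (ondeEstaoAsAspas stringOriginal)

-- ===== LEMMAS AND PROOFS =====
theorem foldl_step_eq (es : List (Int × Char)) : ∀ (sem : List Int) (com : List (List Int)),
    sem.length ≤ 1 →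
    es.foldl ondeEstaoAsAspasStep (sem, com) =
      ((pairStride (sem ++ es.filterMap (fun p => if p.2 = '"' then some p.1 else none))).2,
       com ++ (pairStride (sem ++ es.filterMap (fun p => if p.2 = '"' then some p.1 else none))).1) := by
  induction es with
  | nil =>
    intro sem com h
    match sem, h with
    | [], _ => simp [pairStride]
    | [x], _ => simp [pairStride]
  | cons p es ih =>
    intro sem com h
    by_cases hq : p.2 = '"'
    · match sem, h with
      | [], _ =>
        simp only [List.foldl_cons, ondeEstaoAsAspasStep, hq, if_pos, List.nil_append,
          List.filterMap_cons]
        simpa [pairStride] using ih [p.1] com (by simp)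
      | [x], _ =>
        simp only [List.foldl_cons, ondeEstaoAsAspasStep, hq, if_pos, List.filterMap_cons]
        have := ih [] (com ++ [[x, p.1]]) (by simp)
        simp only [List.nil_append] at this
        simp [this, pairStride]
    · simp only [List.foldl_cons, ondeEstaoAsAspasStep, hq, List.filterMap_cons, if_false]
      exact ih sem com h

-- ===== VERDICT (by name: the statement is the Claim_ definition above) =====
theorem ondeEstaoAsAspas_spec : Claim_equal_ondeEstaoAsAspas := by
  intro s _
  unfold Spec_ondeEstaoAsAspas ondeEstaoAsAspas ondeEstaoAsAspas_alt
  simp [foldl_step_eq (PySem.List.enumerate s.toList) [] [] (by simp)]
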